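-- pv_equiv track=rewrite | github.com/adarshbhandaryp/ABMIL | src/data_loader/mammo_data.py | detect_nonzero_regions
-- ===== SOURCE A (Python) =====
-- def detect_nonzero_regions(numbers):
--     regions = []
--     start = None
--
--     for i, num in enumerate(numbers):
--         if num != 0:
--             if start is None:
--                 start = i
--         elif start is not None:
--             regions.append((start, i-1))
--             start = None
--
--     if start is not None:
--         regions.append((start, len(numbers)-1))
--     return regions
-- ===== SOURCE B (Python) =====
-- def detect_nonzero_regions(numbers):
--     # Two-pointer run scan: find each maximal run of equal (x != 0) key,
--     # emit (start, end) for the nonzero runs.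
--     regions = []
--     i, n = 0, len(numbers)
--     while i < n:
--         j = i
--         while j < n and (numbers[j] != 0) == (numbers[i] != 0):
--             j += 1
--         if numbers[i] != 0:
--             regions.append((i, j - 1))
--         i = j
--     return regions
-- ===== Notes on version B (the rewrite author's own statement) =====
-- stated objective: alternative
-- what changed: Replaces A's start-sentinel state machine (Optional start carried through one enumerate loop plus a final flush) with a two-pointer run scan that advances over each maximal run of equal (x != 0) key and emits nonzero runs directly.
import Mathlib
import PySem

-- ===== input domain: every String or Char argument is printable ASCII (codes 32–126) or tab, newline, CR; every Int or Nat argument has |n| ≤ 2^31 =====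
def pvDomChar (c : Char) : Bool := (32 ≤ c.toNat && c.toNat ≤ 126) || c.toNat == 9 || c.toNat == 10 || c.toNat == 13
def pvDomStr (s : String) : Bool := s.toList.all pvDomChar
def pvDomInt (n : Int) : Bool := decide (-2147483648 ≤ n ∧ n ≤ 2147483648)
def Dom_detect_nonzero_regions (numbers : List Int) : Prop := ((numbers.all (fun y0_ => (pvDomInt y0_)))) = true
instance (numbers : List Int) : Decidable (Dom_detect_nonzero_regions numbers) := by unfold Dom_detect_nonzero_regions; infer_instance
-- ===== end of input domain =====

-- B replaces A's start-sentinel state machine with a two-pointer run scan; same cost, alternative structure.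

-- ===== PORT A =====
-- A's for-loop over enumerate(numbers): state = (regions, start : Option Int), index i.
def pvALoop : List (Int × Int) → Option Int → Int → List Int → (List (Int × Int) × Option Int)
  | regions, start, _, [] => (regions, start)
  | regions, start, i, num :: rest =>
    if num ≠ 0 then
      pvALoop regions (match start with | none => some i | some s => some s) (i + 1) rest
    else
      match start with
      | some s => pvALoop (regions ++ [(s, i - 1)]) none (i + 1) rest
      | none => pvALoop regions none (i + 1) rest

def detect_nonzero_regions (numbers : List Int) : List (Int × Int) :=
  match pvALoop [] none 0 numbers with
  | (regions, some s) => regions ++ [(s, (numbers.length : Int) - 1)]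
  | (regions, none) => regions

-- ===== PORT B =====
-- inner while loop of Source B: length of the leading run whose key (x != 0) equals k, and the rest
def pvTakeRun (k : Bool) : List Int → Nat × List Int
  | [] => (0, [])
  | x :: xs =>
    if (x != 0) = k then ((pvTakeRun k xs).1 + 1, (pvTakeRun k xs).2)
    else (0, x :: xs)

theorem pvTakeRun_len (k : Bool) (xs : List Int) : (pvTakeRun k xs).2.length ≤ xs.length := by
  induction xs with
  | nil => simp [pvTakeRun]
  | cons x xs ih => simp only [pvTakeRun]; split <;> simp; omega

-- outer while loop of Source B: offset = current index, consume one run at a time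
def pvBLoop (offset : Int) : List Int → List (Int × Int)
  | [] => []
  | x :: xs =>
    let k := x != 0
    let t := pvTakeRun k xs
    let len : Int := (t.1 : Int) + 1
    (if k then [(offset, offset + len - 1)] else []) ++ pvBLoop (offset + len) t.2
termination_by l => l.length
decreasing_by
  simpa using Nat.lt_succ_of_le (pvTakeRun_len (x != 0) xs)

def detect_nonzero_regions_alt (numbers : List Int) : List (Int × Int) :=
  pvBLoop 0 numbers

-- ===== PRECONDITION & SPEC =====
def Spec_detect_nonzero_regions (numbers : List Int) (out : List (Int × Int)) : Prop := out = detect_nonzero_regions_alt numbers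
instance (numbers : List Int) (out : List (Int × Int)) : Decidable (Spec_detect_nonzero_regions numbers out) := by unfold Spec_detect_nonzero_regions; infer_instance

-- ===== CLAIM (what is proved, stated in full; the proofs are below) =====
def Claim_equal_detect_nonzero_regions : Prop := ∀ (numbers : List Int), Dom_detect_nonzero_regions numbers → Spec_detect_nonzero_regions numbers (detect_nonzero_regions numbers)

-- ===== LEMMAS AND PROOFS =====

-- A's final flush, applied to the loop result, with iend = index one past the end
def pvFinish (p : List (Int × Int) × Option Int) (iend : Int) : List (Int × Int) :=
  match p.2 with
  | some s => p.1 ++ [(s, iend - 1)]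
  | none => p.1

theorem pvBLoop_zero (i : Int) (xs : List Int) : pvBLoop i (0 :: xs) = pvBLoop (i + 1) xs := by
  cases xs with
  | nil => simp [pvBLoop, pvTakeRun]
  | cons y ys =>
    by_cases hy : y = 0
    · subst hy
      simp only [pvBLoop, pvTakeRun]
      norm_num
      ring_nf
    · have hk : (y != 0) = true := by simpa using hy
      conv_lhs => rw [pvBLoop]
      simp only [pvTakeRun, hk]
      norm_num

-- the two loop invariants, proved together by induction on the remaining list
theorem pvLoop_eq (l : List Int) :
    (∀ (acc : List (Int × Int)) (i : Int),
        pvFinish (pvALoop acc none i l) (i + l.length) = acc ++ pvBLoop i l) ∧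
    (∀ (acc : List (Int × Int)) (s i : Int),
        pvFinish (pvALoop acc (some s) i l) (i + l.length) =
          acc ++ (s, i + ((pvTakeRun true l).1 : Int) - 1) ::
            pvBLoop (i + ((pvTakeRun true l).1 : Int)) (pvTakeRun true l).2) := by
  induction l with
  | nil =>
    constructor
    · intro acc i; simp [pvALoop, pvBLoop, pvFinish]
    · intro acc s i; simp [pvALoop, pvBLoop, pvFinish, pvTakeRun]
  | cons x xs ih =>
    obtain ⟨ih1, ih2⟩ := ih
    constructor
    · intro acc i
      by_cases hx : x = 0
      · subst hx
        simp only [pvALoop, if_neg (by simp : ¬ ((0:Int) ≠ 0))]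
        rw [pvBLoop_zero]
        have := ih1 acc (i + 1)
        simp only [List.length_cons] at *
        rw [← this]; congr 1; push_cast; ring
      · simp only [pvALoop, if_pos hx]
        have := ih2 acc i (i + 1)
        simp only [List.length_cons]
        push_cast
        rw [show i + ((xs.length : Int) + 1) = (i + 1) + xs.length by ring, this]
        simp only [pvBLoop]
        have hk : (x != 0) = true := by simpa using hx
        simp only [hk]
        congr 2
        · (congr 1; ring)
        · congr 1; ring
    · intro acc s i
      by_cases hx : x = 0
      · subst hx
        simp only [pvALoop, if_neg (by simp : ¬ ((0:Int) ≠ 0))]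
        have := ih1 (acc ++ [(s, i - 1)]) (i + 1)
        simp only [List.length_cons]
        push_cast
        rw [show i + ((xs.length : Int) + 1) = (i + 1) + xs.length by ring, this]
        have hk : ((0:Int) != 0) = false := by simp
        simp only [pvTakeRun, hk]
        norm_num
        rw [pvBLoop_zero]
      · simp only [pvALoop, if_pos hx]
        have := ih2 acc s (i + 1)
        simp only [List.length_cons]
        push_cast
        rw [show i + ((xs.length : Int) + 1) = (i + 1) + xs.length by ring, this]
        have hk : (x != 0) = true := by simpa using hx
        simp only [pvTakeRun, hk]
        congr 2
        · congr 1; push_cast; ring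
        · congr 1; push_cast; ring

-- ===== VERDICT (by name: the statement is the Claim_ definition above) =====
theorem detect_nonzero_regions_spec : Claim_equal_detect_nonzero_regions := by
  intro numbers _
  unfold Spec_detect_nonzero_regions detect_nonzero_regions detect_nonzero_regions_alt
  have h := (pvLoop_eq numbers).1 [] 0
  simp only [zero_add, List.nil_append] at h
  rw [← h]
  unfold pvFinish
  rcases pvALoop [] none 0 numbers with ⟨regions, _ | s⟩ <;> simp
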